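-- pv_equiv track=rewrite | github.com/leehk77789/basic-algo-lecture | 0x03/BJ_1946.py | cal_accepted
-- ===== SOURCE A (Python) =====
-- from typing import List
--
-- def cal_accepted(N: int, score: List) -> int:
--     cnt = N
--     min_score = score[1]
--     for i in range(2, N + 1):
--         if score[i] > min_score:
--             cnt -= 1
--         else:
--             min_score = score[i]
--     return cnt
-- ===== SOURCE B (Python) =====
-- def cal_accepted(N, score):
--     m = score[1]
--     seconds = []
--     prefmins = []
--     for i in range(2, N + 1):
--         s = score[i]
--         m = min(m, s)
--         seconds.append(s)
--         prefmins.append(m)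
--     return N - sum(1 for s, p in zip(seconds, prefmins) if s != p)
-- ===== Notes on version B (the rewrite author's own statement) =====
-- stated objective: alternative
-- what changed: A fuses counting into one decrement-on-exceed loop over a scalar (cnt, running-min) state; B first materialises the score and prefix-minimum tables in one phase and then, in a separate zip pass, counts the positions that exceed their running minimum and subtracts that count from N.
import Mathlib
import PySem

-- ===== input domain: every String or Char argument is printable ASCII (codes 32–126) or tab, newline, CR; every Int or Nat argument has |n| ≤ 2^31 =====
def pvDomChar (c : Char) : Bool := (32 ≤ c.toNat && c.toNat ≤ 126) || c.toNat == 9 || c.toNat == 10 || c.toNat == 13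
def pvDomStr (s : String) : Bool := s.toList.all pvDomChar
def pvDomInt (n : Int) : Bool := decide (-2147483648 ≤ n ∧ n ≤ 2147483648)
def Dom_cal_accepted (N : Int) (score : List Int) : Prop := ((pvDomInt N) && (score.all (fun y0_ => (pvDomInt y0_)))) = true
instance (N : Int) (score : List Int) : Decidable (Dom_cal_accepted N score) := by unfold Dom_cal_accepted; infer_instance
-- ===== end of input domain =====

-- B replaces A's fused decrement-on-exceed loop over a scalar (cnt, min) state by a
-- table-building phase (scores and their prefix minima) followed by a separate zip pass
-- that counts the exceeding positions (objective: alternative decomposition, same cost).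

-- ===== PORT A =====
def cal_accepted (N : Int) (score : List Int) : Int :=
  -- cnt = N; min_score = score[1]; for i in range(2, N+1): …
  let init : Int × Int := (N, PySem.List.pyGetD score 1 0)
  let r := (PySem.List.pyRange 2 (N + 1)).foldl
    (fun (st : Int × Int) i =>
      if PySem.List.pyGetD score i 0 > st.2 then (st.1 - 1, st.2)
      else (st.1, PySem.List.pyGetD score i 0)) init
  r.1

-- ===== PORT B =====
def cal_accepted_alt (N : Int) (score : List Int) : Int :=
  -- m = score[1]; seconds = []; prefmins = []
  -- for i in range(2, N+1): s = score[i]; m = min(m, s); seconds.append(s); prefmins.append(m)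
  let init : Int × List Int × List Int := (PySem.List.pyGetD score 1 0, [], [])
  let r := (PySem.List.pyRange 2 (N + 1)).foldl
    (fun (st : Int × List Int × List Int) i =>
      let s := PySem.List.pyGetD score i 0
      let m := min st.1 s
      (m, st.2.1 ++ [s], st.2.2 ++ [m])) init
  -- N - sum(1 for s, p in zip(seconds, prefmins) if s != p)
  N - (((r.2.1.zip r.2.2).filter (fun p => p.1 != p.2)).length : Int)

-- ===== PRECONDITION & SPEC =====
-- Pre_ excludes exactly the inputs where A raises IndexError: score[1] needs length ≥ 2,
-- and the loop reads score[i] for i up to N, so it needs N < len(score).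
def Pre_cal_accepted (N : Int) (score : List Int) : Prop :=
  2 ≤ score.length ∧ N < (score.length : Int)
instance (N : Int) (score : List Int) : Decidable (Pre_cal_accepted N score) := by
  unfold Pre_cal_accepted; infer_instance
def pvWitness_cal_accepted : Int × List Int := (3, [0, 4, 2, 3])

def Spec_cal_accepted (N : Int) (score : List Int) (out : Int) : Prop := out = cal_accepted_alt N score
instance (N : Int) (score : List Int) (out : Int) : Decidable (Spec_cal_accepted N score out) := by unfold Spec_cal_accepted; infer_instance

-- ===== CLAIM (what is proved, stated in full; the proofs are below) =====
def Claim_equal_cal_accepted : Prop := ∀ (N : Int) (score : List Int), Dom_cal_accepted N score → Pre_cal_accepted N score → Spec_cal_accepted N score (cal_accepted N score)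

-- ===== LEMMAS AND PROOFS =====

-- number of rejected applicants among l when the running minimum so far is m
def pvBad : List Int → Int → Int
  | [], _ => 0
  | s :: l, m => (if s > m then 1 else 0) + pvBad l (min m s)

-- prefix-minimum table of l continuing from current minimum m
def pvPM : List Int → Int → List Int
  | [], _ => []
  | s :: l, m => min m s :: pvPM l (min m s)

-- final running minimum (first component of B's fold state)
def pvLM : List Int → Int → Int
  | [], m => m
  | s :: l, m => pvLM l (min m s)

-- A's loop characterised by pvBad over the looked-up values
theorem pvFoldA (xs : List Int) (g : Int → Int) : ∀ (cnt m : Int),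
    ((xs.foldl (fun (st : Int × Int) i =>
        if g i > st.2 then (st.1 - 1, st.2) else (st.1, g i)) (cnt, m)).1)
      = cnt - pvBad (xs.map g) m := by
  induction xs with
  | nil => intro cnt m; simp [pvBad]
  | cons x xs ih =>
    intro cnt m
    by_cases h : g x > m
    · have hm : min m (g x) = m := min_eq_left (by omega)
      simp [List.foldl_cons, h, pvBad, hm, ih]
      omega
    · have hm : min m (g x) = g x := min_eq_right (by omega)
      simp [List.foldl_cons, h, pvBad, hm, ih]

-- B's table-building loop appends the looked-up values and their prefix minima
theorem pvFoldB (xs : List Int) (g : Int → Int) : ∀ (m : Int) (accS accM : List Int),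
    (xs.foldl (fun (st : Int × List Int × List Int) i =>
        (min st.1 (g i), st.2.1 ++ [g i], st.2.2 ++ [min st.1 (g i)])) (m, accS, accM))
      = (pvLM (xs.map g) m, accS ++ xs.map g, accM ++ pvPM (xs.map g) m) := by
  induction xs with
  | nil => intro m accS accM; simp [pvLM, pvPM]
  | cons x xs ih =>
    intro m accS accM
    simp only [List.foldl_cons, ih, List.map_cons, pvLM, pvPM, List.append_assoc,
      List.singleton_append]

-- counting the positions that exceed their running minimum is pvBad
theorem pvCount (l : List Int) : ∀ (m : Int),
    (((l.zip (pvPM l m)).filter (fun p => p.1 != p.2)).length : Int) = pvBad l m := by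
  induction l with
  | nil => intro m; simp [pvPM, pvBad]
  | cons s l ih =>
    intro m
    by_cases h : s > m
    · have hm : min m s = m := min_eq_left (by omega)
      have hne : (s != m) = true := by simp; omega
      simp [pvPM, pvBad, h, hm, hne, ih]
      omega
    · have hm : min m s = s := min_eq_right (by omega)
      simp [pvPM, pvBad, h, hm, ih]

-- ===== VERDICT (by name: the statement is the Claim_ definition above) =====
theorem cal_accepted_spec : Claim_equal_cal_accepted := by
  intro N score _ _
  unfold Spec_cal_accepted cal_accepted cal_accepted_alt
  dsimp only
  have hA := pvFoldA (PySem.List.pyRange 2 (N + 1))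
    (fun i => PySem.List.pyGetD score i 0) N (PySem.List.pyGetD score 1 0)
  have hB := pvFoldB (PySem.List.pyRange 2 (N + 1))
    (fun i => PySem.List.pyGetD score i 0) (PySem.List.pyGetD score 1 0) [] []
  simp only at hA hB
  rw [hA, hB]
  dsimp only
  simp only [List.nil_append]
  rw [pvCount]
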